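-- pv_equiv track=rewrite | github.com/hsinwu13/Developing-a-Step-by-Step-Solver-based-on-Cognitive-Arithmetic-and-Different-Arithmetic-Strategy | multi2.py | carry_list
-- ===== SOURCE A (Python) =====
-- def carry_list(list1, list2):
--     product_list = [0] * (len(list1) + len(list2))
--
--     for i in range(len(list1)):
--         carry = 0
--         for j in range(len(list2)):
--             product = list1[i] * list2[j] + product_list[i + j] + carry
--             product_list[i + j] = product % 10
--             carry = product // 10
--         product_list[i + len(list2)] = carry
--
--     product_list.reverse()
--
--     return product_list
-- ===== SOURCE B (Python) =====
-- def carry_list(list1, list2):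
--     # Interpret each list as a little-endian base-10 number, multiply once as
--     # a Python big integer, then peel off len(list1)+len(list2) floor-div digits
--     # (the top slot keeps the raw final quotient, as the schoolbook carry does)
--     # and reverse.
--     n1 = 0
--     for d in reversed(list1):
--         n1 = n1 * 10 + d
--     n2 = 0
--     for d in reversed(list2):
--         n2 = n2 * 10 + d
--     p = n1 * n2
--     k = len(list1) + len(list2)
--     if k == 0:
--         return []
--     out = []
--     for _ in range(k - 1):
--         p, r = divmod(p, 10)
--         out.append(r)
--     out.append(p)
--     out.reverse()
--     return out
-- ===== Notes on version B (the rewrite author's own statement) =====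
-- stated objective: faster
-- what changed: Replaces the O(n*m) schoolbook digit-by-digit convolution with one Horner evaluation of each list to a Python big integer, a single big-integer multiplication, and one divmod pass peeling off the digits (top slot keeps the raw quotient, exactly as A's final carry does).
import Mathlib
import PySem

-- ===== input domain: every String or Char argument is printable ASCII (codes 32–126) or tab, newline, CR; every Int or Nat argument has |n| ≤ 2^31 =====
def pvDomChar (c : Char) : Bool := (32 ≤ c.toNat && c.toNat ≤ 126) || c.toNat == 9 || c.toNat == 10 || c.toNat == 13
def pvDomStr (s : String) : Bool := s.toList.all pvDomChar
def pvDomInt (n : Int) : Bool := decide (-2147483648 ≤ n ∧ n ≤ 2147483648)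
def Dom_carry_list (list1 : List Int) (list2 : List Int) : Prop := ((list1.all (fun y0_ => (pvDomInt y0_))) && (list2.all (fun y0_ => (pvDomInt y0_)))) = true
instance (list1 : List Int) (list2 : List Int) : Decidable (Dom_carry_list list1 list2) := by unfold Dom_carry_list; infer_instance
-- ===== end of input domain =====

-- B replaces A's O(n*m) schoolbook digit convolution by: Horner-evaluate both
-- lists to one integer each, multiply once, peel the digits off with divmod
-- (objective: faster; a timing run measured the speed-up).

-- ===== PORT A =====
-- inner 'for j in range(len(list2))' loop: state = (product_list, carry);
-- list indexing is always in range here, so List.getD is exact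
def carryInnerA (list1 list2 : List Int) (i : Nat) : Nat → Nat → List Int → Int → List Int × Int
  | 0, _, p, c => (p, c)
  | rem+1, j, p, c =>
      let product := list1.getD i 0 * list2.getD j 0 + p.getD (i+j) 0 + c
      carryInnerA list1 list2 i rem (j+1) (p.set (i+j) (PySem.Int.mod product 10)) (PySem.Int.floordiv product 10)

-- outer 'for i in range(len(list1))' loop
def carryOuterA (list1 list2 : List Int) : Nat → Nat → List Int → List Int
  | 0, _, p => p
  | rem+1, i, p =>
      let pc := carryInnerA list1 list2 i list2.length 0 p 0
      carryOuterA list1 list2 rem (i+1) (pc.1.set (i + list2.length) pc.2)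

def carry_list (list1 : List Int) (list2 : List Int) : List Int :=
  (carryOuterA list1 list2 list1.length 0 (List.replicate (list1.length + list2.length) 0)).reverse

-- ===== PORT B =====
-- the 'for _ in range(k-1): p, r = divmod(p, 10); out.append(r)' loop plus the
-- final 'out.append(p)': counts down the k-1 remaining steps
def digitsLoopB : Nat → Int → List Int
  | 0, p => [p]
  | t+1, p => PySem.Int.mod p 10 :: digitsLoopB t (PySem.Int.floordiv p 10)

def carry_list_alt (list1 : List Int) (list2 : List Int) : List Int :=
  let n1 := list1.reverse.foldl (fun a d => a * 10 + d) 0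
  let n2 := list2.reverse.foldl (fun a d => a * 10 + d) 0
  let p := n1 * n2
  let k := list1.length + list2.length
  if k = 0 then [] else (digitsLoopB (k-1) p).reverse

-- ===== PRECONDITION & SPEC =====
def Spec_carry_list (list1 : List Int) (list2 : List Int) (out : List Int) : Prop := out = carry_list_alt list1 list2
instance (list1 : List Int) (list2 : List Int) (out : List Int) : Decidable (Spec_carry_list list1 list2 out) := by unfold Spec_carry_list; infer_instance

-- ===== CLAIM (what is proved, stated in full; the proofs are below) =====
def Claim_equal_carry_list : Prop := ∀ (list1 : List Int) (list2 : List Int), Dom_carry_list list1 list2 → Spec_carry_list list1 list2 (carry_list list1 list2)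

-- ===== LEMMAS AND PROOFS =====

-- Python floordiv/mod by 10 are Euclidean div/mod (divisor positive)
theorem pvFd (x : Int) : PySem.Int.floordiv x 10 = x / 10 :=
  PySem.Int.floordiv_eq_ediv_of_pos (by norm_num)
theorem pvMd (x : Int) : PySem.Int.mod x 10 = x % 10 :=
  PySem.Int.mod_eq_emod_of_pos (by norm_num)

-- little-endian value of a digit list (what the Horner fold computes)
def hv (xs : List Int) : Int := xs.reverse.foldl (fun a d => a * 10 + d) 0

-- the s low digits of P
def lowD : Nat → Int → List Int
  | 0, _ => []
  | s+1, P => P % 10 :: lowD s (P / 10)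

-- reference form of digitsLoopB: low digits then the raw final quotient
def dref (t : Nat) (P : Int) : List Int := lowD t P ++ [P / 10 ^ t]

-- reference form of A's inner loop: (new digits, untouched rest, carry out)
def chain (a : Int) : List Int → List Int → Int → List Int × List Int × Int
  | [], rest, c => ([], rest, c)
  | b :: bs, rest, c =>
      let prod := a * b + rest.getD 0 0 + c
      let r := chain a bs rest.tail (prod / 10)
      ((prod % 10) :: r.1, r.2.1, r.2.2)

theorem ediv_ediv_pow (P : Int) (s t : Nat) : P / 10 ^ s / 10 ^ t = P / 10 ^ (s + t) := by
  rw [pow_add]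
  exact Int.ediv_ediv_of_nonneg (by positivity)

theorem ediv_ten_pow (P : Int) (t : Nat) : P / 10 / 10 ^ t = P / 10 ^ (t + 1) := by
  have h := ediv_ediv_pow P 1 t
  rw [pow_one, Nat.add_comm 1 t] at h
  exact h

theorem digitsLoopB_eq_dref (t : Nat) (P : Int) : digitsLoopB t P = dref t P := by
  induction t generalizing P with
  | zero => simp [digitsLoopB, dref, lowD, pvMd, pvFd]
  | succ t ih =>
      simp only [digitsLoopB, pvMd, pvFd, ih, dref, lowD, List.cons_append, List.cons.injEq, true_and]
      rw [ediv_ten_pow]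

theorem lowD_length (s : Nat) (P : Int) : (lowD s P).length = s := by
  induction s generalizing P with
  | zero => rfl
  | succ s ih => simp [lowD, ih]

theorem lowD_zero (s : Nat) : lowD s 0 = List.replicate s 0 := by
  induction s with
  | zero => rfl
  | succ s ih => simp [lowD, ih, List.replicate_succ]

theorem lowD_append (s t : Nat) (P : Int) :
    lowD (s + t) P = lowD s P ++ lowD t (P / 10 ^ s) := by
  induction s generalizing P with
  | zero => simp [lowD]
  | succ s ih =>
      have : s + 1 + t = (s + t) + 1 := by omega
      rw [this]
      simp only [lowD, List.cons_append, List.cons.injEq, true_and, ih]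
      congr 1
      rw [ediv_ten_pow]

theorem lowD_add_mul (s : Nat) (P q : Int) : lowD s (P + 10 ^ s * q) = lowD s P := by
  induction s generalizing P q with
  | zero => rfl
  | succ s ih =>
      simp only [lowD, List.cons.injEq]
      constructor
      · rw [pow_succ, mul_comm (10^s : Int) 10, mul_assoc]
        exact Int.add_mul_emod_self_left P 10 (10 ^ s * q)
      · rw [pow_succ, mul_comm (10^s : Int) 10, mul_assoc,
          Int.add_mul_ediv_left P _ (by norm_num)]
        exact ih (P / 10) q

-- Horner fold lemmas
theorem foldl_horner_shift (ys : List Int) (acc : Int) :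
    ys.foldl (fun a d => a * 10 + d) acc
      = acc * 10 ^ ys.length + ys.foldl (fun a d => a * 10 + d) 0 := by
  induction ys generalizing acc with
  | nil => simp
  | cons y ys ih =>
      simp only [List.foldl_cons, List.length_cons]
      rw [ih (acc * 10 + y), ih (0 * 10 + y)]
      ring

theorem hv_append (xs : List Int) (a : Int) : hv (xs ++ [a]) = hv xs + a * 10 ^ xs.length := by
  unfold hv
  rw [List.reverse_append]
  simp only [List.reverse_cons, List.reverse_nil, List.nil_append, List.singleton_append,
    List.foldl_cons]
  rw [foldl_horner_shift, List.length_reverse]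
  ring

theorem hv_cons (b : Int) (bs : List Int) : hv (b :: bs) = 10 * hv bs + b := by
  unfold hv
  rw [show (b :: bs).reverse = bs.reverse ++ [b] by simp]
  rw [List.foldl_append]
  simp [mul_comm]

-- list surgery at the junction of an append
theorem getD_append_len (D : List Int) (r0 : Int) (rt : List Int) (d : Int) :
    (D ++ r0 :: rt).getD D.length d = r0 := by
  induction D with
  | nil => rfl
  | cons x D ih => simpa using ih

theorem set_append_len (D : List Int) (r0 x : Int) (rt : List Int) :
    (D ++ r0 :: rt).set D.length x = D ++ x :: rt := by
  induction D with
  | nil => rfl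
  | cons y D ih => simpa [List.set] using ih

theorem set_replicate_zero (k i : Nat) :
    (List.replicate k (0:Int)).set i 0 = List.replicate k 0 := by
  induction k generalizing i with
  | zero => rfl
  | succ k ih =>
      cases i with
      | zero => simp [List.replicate_succ, List.set]
      | succ i => simp [List.replicate_succ, List.set, ih]

-- A's inner loop equals the chain reference, run on the rest of the array
theorem innerA_eq_chain (list1 list2 : List Int) (i : Nat) :
    ∀ (bs : List Int) (j : Nat) (D rest : List Int) (c : Int),
      bs = list2.drop j → D.length = i + j → bs.length ≤ rest.length →
      carryInnerA list1 list2 i bs.length j (D ++ rest) c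
        = (D ++ (chain (list1.getD i 0) bs rest c).1 ++ (chain (list1.getD i 0) bs rest c).2.1,
           (chain (list1.getD i 0) bs rest c).2.2) := by
  intro bs
  induction bs with
  | nil => intro j D rest c _ _ _; simp [carryInnerA, chain]
  | cons b bs ih =>
      intro j D rest c hdrop hD hlen
      cases rest with
      | nil => simp at hlen
      | cons r0 rt =>
          have hb : list2.getD j 0 = b := by
            have : list2[j]? = some b := by
              have := congrArg List.head? hdrop
              simpa [List.head?_drop] using this.symm
            simp [List.getD, this]
          have hbs : bs = list2.drop (j+1) := by
            have := congrArg List.tail hdrop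
            simpa [List.tail_drop] using this
          simp only [List.length_cons, carryInnerA]
          rw [hb]
          rw [show i + j = D.length from hD.symm, getD_append_len, set_append_len]
          have hD' : (D ++ [(PySem.Int.mod (list1.getD i 0 * b + r0 + c) 10)]).length = i + (j+1) := by
            simp [hD]; omega
          have := ih (j+1) (D ++ [(PySem.Int.mod (list1.getD i 0 * b + r0 + c) 10)]) rt
            (PySem.Int.floordiv (list1.getD i 0 * b + r0 + c) 10) hbs hD' (by simpa using Nat.lt_succ_iff.mp (by simpa using hlen))
          rw [show D ++ PySem.Int.mod (list1.getD i 0 * b + r0 + c) 10 :: rt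
              = (D ++ [PySem.Int.mod (list1.getD i 0 * b + r0 + c) 10]) ++ rt by simp]
          rw [this]
          simp only [chain, pvFd, pvMd, List.getD, List.tail]
          simp [pvFd, pvMd]

theorem dref_succ (t : Nat) (R : Int) : dref (t+1) R = R % 10 :: dref t (R / 10) := by
  simp only [dref, lowD, List.cons_append, ediv_ten_pow]

theorem chain_cons (a b c : Int) (bs rest : List Int) :
    chain a (b :: bs) rest c
      = ((a * b + rest.getD 0 0 + c) % 10 :: (chain a bs rest.tail ((a * b + rest.getD 0 0 + c) / 10)).1,
         (chain a bs rest.tail ((a * b + rest.getD 0 0 + c) / 10)).2.1,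
         (chain a bs rest.tail ((a * b + rest.getD 0 0 + c) / 10)).2.2) := rfl

-- the carry chain over digits: core arithmetic of the equivalence
theorem chain_spec (a : Int) :
    ∀ (bs : List Int) (b : Int) (R : Int) (Z : List Int) (c : Int),
      chain a (b :: bs) (dref bs.length R ++ Z) c
        = (lowD (bs.length + 1) (R + c + a * hv (b :: bs)), Z,
           (R + c + a * hv (b :: bs)) / 10 ^ (bs.length + 1)) := by
  intro bs
  induction bs with
  | nil =>
      intro b R Z c
      rw [chain_cons]
      simp only [List.length_nil, dref, lowD, pow_zero, Int.ediv_one, List.nil_append,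
        List.cons_append, List.getD_cons_zero, List.tail_cons, chain]
      have hS : a * b + R + c = R + c + a * hv [b] := by
        simp [hv]; ring
      rw [hS]
      simp [lowD, pow_one]
  | cons b' bs ih =>
      intro b R Z c
      simp only [List.length_cons]
      rw [dref_succ, List.cons_append, chain_cons]
      simp only [List.getD_cons_zero, List.tail_cons]
      rw [ih b' (R / 10) Z ((a * b + R % 10 + c) / 10)]
      set prod := a * b + R % 10 + c with hprod
      set hvp := hv (b' :: bs) with hhvp
      set S := R + c + a * hv (b :: b' :: bs) with hSd
      have hS : S = prod + 10 * (R / 10 + a * hvp) := by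
        rw [hSd, hv_cons b (b' :: bs), ← hhvp, hprod]
        have h10 : R % 10 = R - 10 * (R / 10) := by omega
        rw [h10]
        ring
      have hS1 : R / 10 + prod / 10 + a * hvp = S / 10 := by
        rw [hS, Int.add_mul_ediv_left prod _ (by norm_num : (10:Int) ≠ 0)]
        ring
      have hprodm : prod % 10 = S % 10 := by
        rw [hS, Int.add_mul_emod_self_left]
      dsimp only
      simp only [Prod.mk.injEq]
      refine ⟨?_, trivial, ?_⟩
      · rw [hS1, hprodm]
        rfl
      · rw [hS1, ediv_ten_pow]

theorem chain_spec' (a : Int) (l : List Int) (hl : l ≠ []) (R : Int) (Z : List Int) :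
    chain a l (dref (l.length - 1) R ++ Z) 0
      = (lowD l.length (R + a * hv l), Z, (R + a * hv l) / 10 ^ l.length) := by
  cases l with
  | nil => exact absurd rfl hl
  | cons b bs =>
      simp only [List.length_cons, Nat.add_sub_cancel]
      rw [chain_spec a bs b R Z 0]
      rw [show R + 0 + a * hv (b :: bs) = R + a * hv (b :: bs) by ring]

theorem lowD_shift (i L : Nat) (hL : 1 ≤ L) (P : Int) (tail : List Int) :
    lowD i P ++ (lowD L (P / 10 ^ i) ++ tail)
      = lowD (i+1) P ++ (lowD (L - 1) (P / 10 ^ (i+1)) ++ tail) := by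
  rw [← List.append_assoc, ← List.append_assoc, ← lowD_append, ← lowD_append]
  rw [show i + 1 + (L - 1) = i + L from by omega]

-- A's outer loop preserves the digit invariant
theorem outerA_spec (list1 list2 : List Int) (hm : 1 ≤ list2.length) :
    ∀ (rem i : Nat), i + rem = list1.length →
      carryOuterA list1 list2 rem i
        (lowD i (hv (list1.take i) * hv list2)
          ++ dref (list2.length - 1) ((hv (list1.take i) * hv list2) / 10 ^ i)
          ++ List.replicate (list1.length - i) 0)
        = lowD list1.length (hv list1 * hv list2)
          ++ dref (list2.length - 1) ((hv list1 * hv list2) / 10 ^ list1.length) := by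
  intro rem
  induction rem with
  | zero =>
      intro i hi
      have : i = list1.length := by omega
      subst this
      simp [carryOuterA, List.take_length]
  | succ rem ih =>
      intro i hi
      have hilt : i < list1.length := by omega
      simp only [carryOuterA]
      have hne : list2 ≠ [] := by
        intro h; rw [h] at hm; simp at hm
      set a := list1.getD i 0 with ha
      set Pi := hv (list1.take i) * hv list2 with hPi
      have hdrop : list2 = list2.drop 0 := by simp
      have hDlen : (lowD i Pi).length = i + 0 := by simp [lowD_length]
      have hlen : list2.length ≤ (dref (list2.length - 1) (Pi / 10 ^ i) ++ List.replicate (list1.length - i) 0).length := by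
        simp [dref, lowD_length]
        omega
      have hinner := innerA_eq_chain list1 list2 i list2 0 (lowD i Pi)
        (dref (list2.length - 1) (Pi / 10 ^ i) ++ List.replicate (list1.length - i) 0) 0 hdrop hDlen hlen
      have hchain := chain_spec' a list2 hne (Pi / 10 ^ i) (List.replicate (list1.length - i) 0)
      rw [List.append_assoc] at hinner ⊢
      rw [hinner, hchain]
      -- now the final write of the carry
      set S := Pi / 10 ^ i + a * hv list2 with hSdef
      set Pi' := hv (list1.take (i+1)) * hv list2 with hPi'
      have htake : list1.take (i+1) = list1.take i ++ [a] := by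
        rw [List.take_succ]
        congr 1
        have h : list1[i]? = some (list1.getD i 0) := by
          rw [List.getD, List.getElem?_eq_getElem hilt]
          simp
        rw [h, ← ha]
        rfl
      have hPi'eq : Pi' = Pi + 10 ^ i * (a * hv list2) := by
        rw [hPi', htake, hv_append, hPi]
        have : (list1.take i).length = i := by simp [List.length_take]; omega
        rw [this]
        ring
      have hSP : S = Pi' / 10 ^ i := by
        rw [hPi'eq, Int.add_mul_ediv_left Pi _ (by positivity : (10:Int) ^ i ≠ 0), hSdef]
      have hlowPi : lowD i Pi = lowD i Pi' := by
        rw [hPi'eq]; exact (lowD_add_mul i Pi (a * hv list2)).symm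
      -- perform the set at position i + list2.length
      have hrep : List.replicate (list1.length - i) (0:Int)
          = 0 :: List.replicate (list1.length - i - 1) 0 := by
        rw [← List.replicate_succ]
        congr 1
        omega
      have hfstlen : (lowD i Pi ++ lowD list2.length S).length = i + list2.length := by
        simp [lowD_length]
      rw [← List.append_assoc, hrep,
          show i + list2.length = (lowD i Pi ++ lowD list2.length S).length from hfstlen.symm,
          set_append_len]
      -- rearrange into the invariant at i+1
      have hkey : lowD i Pi ++ lowD list2.length S ++ S / 10 ^ list2.length :: List.replicate (list1.length - i - 1) 0
          = lowD (i+1) Pi' ++ dref (list2.length - 1) (Pi' / 10 ^ (i+1)) ++ List.replicate (list1.length - (i+1)) 0 := by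
        rw [hlowPi, hSP, ediv_ediv_pow]
        simp only [dref, ediv_ediv_pow, List.append_assoc, List.singleton_append]
        rw [show i + 1 + (list2.length - 1) = i + list2.length from by omega,
            show list1.length - (i+1) = list1.length - i - 1 from by omega]
        exact lowD_shift i list2.length hm Pi' _
      rw [hkey]
      exact ih (i+1) (by omega)

-- degenerate outer loop when list2 is empty
theorem outerA_nil2 (list1 : List Int) (K : Nat) :
    ∀ (rem i : Nat), carryOuterA list1 [] rem i (List.replicate K 0) = List.replicate K 0 := by
  intro rem
  induction rem with
  | zero => intro i; rfl
  | succ rem ih =>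
      intro i
      simp only [carryOuterA, List.length_nil, carryInnerA, Nat.add_zero]
      rw [set_replicate_zero]
      exact ih (i+1)

-- ===== VERDICT (by name: the statement is the Claim_ definition above) =====
theorem carry_list_spec : Claim_equal_carry_list := by
  intro list1 list2 _hd
  show carry_list list1 list2 = carry_list_alt list1 list2
  unfold carry_list carry_list_alt
  by_cases hm : list2.length = 0
  · -- list2 empty
    have h2 : list2 = [] := List.eq_nil_of_length_eq_zero hm
    subst h2
    by_cases hn : list1.length = 0
    · have h1 : list1 = [] := List.eq_nil_of_length_eq_zero hn
      subst h1
      simp [carryOuterA]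
    · simp only [List.length_nil, Nat.add_zero]
      rw [outerA_nil2]
      have hk : ¬(list1.length + 0 = 0) := by omega
      simp only [Nat.add_zero, if_neg hn]
      rw [digitsLoopB_eq_dref]
      have hz : (list1.reverse.foldl (fun a d => a * 10 + d) 0) * ([] : List Int).reverse.foldl (fun a d => a * 10 + d) 0 = 0 := by
        simp
      rw [hz]
      simp only [dref, lowD_zero, Int.zero_ediv]
      rw [← List.replicate_succ',
          show list1.length - 1 + 1 = list1.length from by omega]
  · by_cases hn : list1.length = 0
    · -- list1 empty: outer loop does nothing
      have h1 : list1 = [] := List.eq_nil_of_length_eq_zero hn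
      subst h1
      simp only [List.length_nil, Nat.zero_add, carryOuterA]
      have hk : ¬(list2.length = 0) := hm
      simp only [if_neg hk]
      rw [digitsLoopB_eq_dref]
      have hz : (([] : List Int).reverse.foldl (fun a d => a * 10 + d) 0) * list2.reverse.foldl (fun a d => a * 10 + d) 0 = 0 := by simp
      rw [hz]
      simp only [dref, lowD_zero, Int.zero_ediv]
      rw [← List.replicate_succ',
          show list2.length - 1 + 1 = list2.length from by omega]
    · -- main case
      have hm1 : 1 ≤ list2.length := by omega
      have hstart : List.replicate (list1.length + list2.length) (0:Int)
          = lowD 0 (hv (list1.take 0) * hv list2)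
            ++ dref (list2.length - 1) ((hv (list1.take 0) * hv list2) / 10 ^ 0)
            ++ List.replicate (list1.length - 0) 0 := by
        simp only [List.take_zero, lowD, List.nil_append, Nat.sub_zero]
        have hz : hv ([] : List Int) * hv list2 = 0 := by simp [hv]
        rw [hz]
        simp only [Int.zero_ediv, dref, lowD_zero, Int.zero_ediv]
        rw [← List.replicate_succ',
            show list2.length - 1 + 1 = list2.length from by omega,
            List.replicate_append_replicate, Nat.add_comm]
      rw [hstart, outerA_spec list1 list2 hm1 list1.length 0 (by omega)]
      have hk : ¬(list1.length + list2.length = 0) := by omega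
      simp only [if_neg hk]
      rw [digitsLoopB_eq_dref]
      have hBval : (list1.reverse.foldl (fun a d => a * 10 + d) 0) * (list2.reverse.foldl (fun a d => a * 10 + d) 0) = hv list1 * hv list2 := rfl
      rw [hBval]
      congr 1
      simp only [dref]
      rw [← List.append_assoc]
      have h2 : lowD list1.length (hv list1 * hv list2) ++ lowD (list2.length - 1) (hv list1 * hv list2 / 10 ^ list1.length)
          = lowD (list1.length + list2.length - 1) (hv list1 * hv list2) := by
        rw [← lowD_append]
        congr 1
        omega
      rw [h2, ediv_ediv_pow,
          show list1.length + (list2.length - 1) = list1.length + list2.length - 1 from by omega]
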